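-- pv_equiv track=rewrite | github.com/jaslolxD/bluesky | bluesky/plugins/Thesis_stuff/plotter.py | datagatherlookahead
-- ===== SOURCE A (Python) =====
-- def datagatherlookahead(lookahead, directory, logtype, index_traf):
--     conflog_40_state = []
--     conflog_60_state = []
--     conflog_80_state = []
--     conflog_100_state = []
--     conflog_120_state = []
--     conflog_140_state = []
--
--     conflog_40_traj = []
--     conflog_60_traj = []
--     conflog_80_traj = []
--     conflog_100_traj = []
--     conflog_120_traj = []
--     conflog_140_traj = []
--     index_traf_1 = index_traf[0]
--     index_traf_2 = index_traf[1]
--     index_traf_3 = index_traf[2]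
--     index_traf_4 = index_traf[3]
--     for file in directory:
--         if logtype[0] in file and "WASLOSLOG" not in file:
--             #conflog [28:31] and [28:30]
--             #loslog  [19:22] and [19:23]
--             #flstlog [20:23] and [20:22]
--             if file[index_traf_1[0]:index_traf_1[1]] == "100" and file[index_traf_1[0]+4:index_traf_1[1]+3] == str(lookahead):
--                 conflog_100_state.append(file)
--             elif file[index_traf_1[0]:index_traf_1[1]] == "120" and file[index_traf_1[0]+4:index_traf_1[1]+3] == str(lookahead):
--                 conflog_120_state.append(file)
--             elif file[index_traf_1[0]:index_traf_1[1]] == "140" and file[index_traf_1[0]+4:index_traf_1[1]+3] == str(lookahead):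
--                 conflog_140_state.append(file)
--             elif file[index_traf_2[0]:index_traf_2[1]] == "80" and file[index_traf_2[0]+3:index_traf_2[1]+3] == str(lookahead):
--                 conflog_80_state.append(file)
--             elif file[index_traf_2[0]:index_traf_2[1]] == "60"and file[index_traf_2[0]+3:index_traf_2[1]+3] == str(lookahead):
--                 conflog_60_state.append(file)
--             elif file[index_traf_2[0]:index_traf_2[1]] == "40"and file[index_traf_2[0]+3:index_traf_2[1]+3] == str(lookahead):
--                 conflog_40_state.append(file)
--
--         elif logtype[1] in file and "WASLOSLOG" not in file:
--             #conflog [32:35] [32:34]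
--             #loslog [23:26] [23:25]
--             #flst [24:27] [24:26]
--             if file[index_traf_3[0]:index_traf_3[1]] == "100" and file[index_traf_3[0]+4:index_traf_3[1]+3] == str(lookahead):
--                 conflog_100_traj.append(file)
--             elif file[index_traf_3[0]:index_traf_3[1]] == "120" and file[index_traf_3[0]+4:index_traf_3[1]+3] == str(lookahead):
--                 conflog_120_traj.append(file)
--             elif file[index_traf_3[0]:index_traf_3[1]] == "140" and file[index_traf_3[0]+4:index_traf_3[1]+3] == str(lookahead):
--                 conflog_140_traj.append(file)
--             elif file[index_traf_4[0]:index_traf_4[1]] == "80" and file[index_traf_4[0]+3:index_traf_4[1]+3] == str(lookahead):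
--                 conflog_80_traj.append(file)
--             elif file[index_traf_4[0]:index_traf_4[1]] == "60" and file[index_traf_4[0]+3:index_traf_4[1]+3] == str(lookahead):
--                 conflog_60_traj.append(file)
--             elif file[index_traf_4[0]:index_traf_4[1]] == "40" and file[index_traf_4[0]+3:index_traf_4[1]+3] == str(lookahead):
--                 conflog_40_traj.append(file)
--
--     return [conflog_40_state, conflog_40_traj, conflog_60_state, conflog_60_traj, conflog_80_state, conflog_80_traj,  conflog_100_state, conflog_100_traj, conflog_120_state, conflog_120_traj, conflog_140_state, conflog_140_traj]
-- ===== SOURCE B (Python) =====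
-- def datagatherlookahead(lookahead, directory, logtype, index_traf):
--     la = str(lookahead)
--     hi = (index_traf[0], index_traf[2])
--     lo = (index_traf[1], index_traf[3])
--
--     def tag(f):
--         if "WASLOSLOG" in f:
--             return None
--         if logtype[0] in f:
--             c = 0
--         elif logtype[1] in f:
--             c = 1
--         else:
--             return None
--         h, l = hi[c], lo[c]
--         s3 = f[h[0]:h[1]]
--         if s3 in ("100", "120", "140") and f[h[0] + 4:h[1] + 3] == la:
--             return (c, s3)
--         s2 = f[l[0]:l[1]]
--         if s2 in ("80", "60", "40") and f[l[0] + 3:l[1] + 3] == la: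
--             return (c, s2)
--         return None
--
--     return [[f for f in directory if tag(f) == (c, t)]
--             for t in ("40", "60", "80", "100", "120", "140") for c in (0, 1)]
-- ===== Notes on version B (the rewrite author's own statement) =====
-- stated objective: simpler
-- what changed: Replaces A's single pass with twelve named accumulator lists and a duplicated 6-way elif chain per category by one pure classifier tag(file) -> (category, traffic) plus twelve filter comprehensions over the directory in the fixed output order.
import Mathlib
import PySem

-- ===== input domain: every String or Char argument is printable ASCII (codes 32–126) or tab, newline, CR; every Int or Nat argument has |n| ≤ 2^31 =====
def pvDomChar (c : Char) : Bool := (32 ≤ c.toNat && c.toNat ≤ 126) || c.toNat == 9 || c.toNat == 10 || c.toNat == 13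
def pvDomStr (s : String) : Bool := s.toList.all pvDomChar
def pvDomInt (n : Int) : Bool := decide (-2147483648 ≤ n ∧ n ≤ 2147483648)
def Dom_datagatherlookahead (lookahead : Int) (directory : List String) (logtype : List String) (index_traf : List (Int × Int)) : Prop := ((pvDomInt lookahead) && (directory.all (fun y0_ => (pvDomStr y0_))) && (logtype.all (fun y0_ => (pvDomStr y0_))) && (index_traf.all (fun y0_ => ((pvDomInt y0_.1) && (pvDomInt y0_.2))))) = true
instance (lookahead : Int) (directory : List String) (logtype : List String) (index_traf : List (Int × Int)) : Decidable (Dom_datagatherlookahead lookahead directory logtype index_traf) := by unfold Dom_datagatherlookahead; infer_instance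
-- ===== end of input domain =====

-- B re-decomposes A's single 12-accumulator loop into one pure classifier `tag` plus
-- twelve filters over the directory (objective: simpler; return value only, no side effects).

-- ===== PORT A =====
-- state of A's twelve accumulator lists, in A's output order
structure Buckets where
  s40 : List String
  t40 : List String
  s60 : List String
  t60 : List String
  s80 : List String
  t80 : List String
  s100 : List String
  t100 : List String
  s120 : List String
  t120 : List String
  s140 : List String
  t140 : List String
deriving Repr, DecidableEq

-- A's loop body (la = str(lookahead), lt0/lt1 = logtype[0]/logtype[1], i1..i4 = index_traf[0..3])
def dgStepA (la lt0 lt1 : String) (i1 i2 i3 i4 : Int × Int) (b : Buckets) (file : String) : Buckets :=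
  if PySem.Str.isIn lt0 file && !PySem.Str.isIn "WASLOSLOG" file then
    if PySem.Str.slice file (some i1.1) (some i1.2) == "100" && PySem.Str.slice file (some (i1.1+4)) (some (i1.2+3)) == la then
      { b with s100 := b.s100 ++ [file] }
    else if PySem.Str.slice file (some i1.1) (some i1.2) == "120" && PySem.Str.slice file (some (i1.1+4)) (some (i1.2+3)) == la then
      { b with s120 := b.s120 ++ [file] }
    else if PySem.Str.slice file (some i1.1) (some i1.2) == "140" && PySem.Str.slice file (some (i1.1+4)) (some (i1.2+3)) == la then
      { b with s140 := b.s140 ++ [file] }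
    else if PySem.Str.slice file (some i2.1) (some i2.2) == "80" && PySem.Str.slice file (some (i2.1+3)) (some (i2.2+3)) == la then
      { b with s80 := b.s80 ++ [file] }
    else if PySem.Str.slice file (some i2.1) (some i2.2) == "60" && PySem.Str.slice file (some (i2.1+3)) (some (i2.2+3)) == la then
      { b with s60 := b.s60 ++ [file] }
    else if PySem.Str.slice file (some i2.1) (some i2.2) == "40" && PySem.Str.slice file (some (i2.1+3)) (some (i2.2+3)) == la then
      { b with s40 := b.s40 ++ [file] }
    else b
  else if PySem.Str.isIn lt1 file && !PySem.Str.isIn "WASLOSLOG" file then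
    if PySem.Str.slice file (some i3.1) (some i3.2) == "100" && PySem.Str.slice file (some (i3.1+4)) (some (i3.2+3)) == la then
      { b with t100 := b.t100 ++ [file] }
    else if PySem.Str.slice file (some i3.1) (some i3.2) == "120" && PySem.Str.slice file (some (i3.1+4)) (some (i3.2+3)) == la then
      { b with t120 := b.t120 ++ [file] }
    else if PySem.Str.slice file (some i3.1) (some i3.2) == "140" && PySem.Str.slice file (some (i3.1+4)) (some (i3.2+3)) == la then
      { b with t140 := b.t140 ++ [file] }
    else if PySem.Str.slice file (some i4.1) (some i4.2) == "80" && PySem.Str.slice file (some (i4.1+3)) (some (i4.2+3)) == la then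
      { b with t80 := b.t80 ++ [file] }
    else if PySem.Str.slice file (some i4.1) (some i4.2) == "60" && PySem.Str.slice file (some (i4.1+3)) (some (i4.2+3)) == la then
      { b with t60 := b.t60 ++ [file] }
    else if PySem.Str.slice file (some i4.1) (some i4.2) == "40" && PySem.Str.slice file (some (i4.1+3)) (some (i4.2+3)) == la then
      { b with t40 := b.t40 ++ [file] }
    else b
  else b

def datagatherlookahead (lookahead : Int) (directory : List String) (logtype : List String) (index_traf : List (Int × Int)) : List (List String) :=
  let i1 := PySem.List.pyGetD index_traf 0 ((0 : Int), (0 : Int))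
  let i2 := PySem.List.pyGetD index_traf 1 ((0 : Int), (0 : Int))
  let i3 := PySem.List.pyGetD index_traf 2 ((0 : Int), (0 : Int))
  let i4 := PySem.List.pyGetD index_traf 3 ((0 : Int), (0 : Int))
  let st := directory.foldl
    (dgStepA (PySem.Int.toStr lookahead) (PySem.List.pyGetD logtype 0 "") (PySem.List.pyGetD logtype 1 "") i1 i2 i3 i4)
    ⟨[], [], [], [], [], [], [], [], [], [], [], []⟩
  [st.s40, st.t40, st.s60, st.t60, st.s80, st.t80, st.s100, st.t100, st.s120, st.t120, st.s140, st.t140]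

-- ===== PORT B =====
-- B's inner classification of one file for the already-chosen category c (h = 3-digit window, l = 2-digit window)
def dgClassify (la : String) (c : Int) (h l : Int × Int) (f : String) : Option (Int × String) :=
  let s3 := PySem.Str.slice f (some h.1) (some h.2)
  if (s3 == "100" || s3 == "120" || s3 == "140") && PySem.Str.slice f (some (h.1+4)) (some (h.2+3)) == la then
    some (c, s3)
  else
    let s2 := PySem.Str.slice f (some l.1) (some l.2)
    if (s2 == "80" || s2 == "60" || s2 == "40") && PySem.Str.slice f (some (l.1+3)) (some (l.2+3)) == la then
      some (c, s2)
    else none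

-- B's `tag`: the (category, traffic) key of one file, or none
def dgTag (la lt0 lt1 : String) (i1 i2 i3 i4 : Int × Int) (f : String) : Option (Int × String) :=
  if PySem.Str.isIn "WASLOSLOG" f then none
  else if PySem.Str.isIn lt0 f then dgClassify la 0 i1 i2 f
  else if PySem.Str.isIn lt1 f then dgClassify la 1 i3 i4 f
  else none

def datagatherlookahead_alt (lookahead : Int) (directory : List String) (logtype : List String) (index_traf : List (Int × Int)) : List (List String) :=
  let la := PySem.Int.toStr lookahead
  let i1 := PySem.List.pyGetD index_traf 0 ((0 : Int), (0 : Int))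
  let i2 := PySem.List.pyGetD index_traf 1 ((0 : Int), (0 : Int))
  let i3 := PySem.List.pyGetD index_traf 2 ((0 : Int), (0 : Int))
  let i4 := PySem.List.pyGetD index_traf 3 ((0 : Int), (0 : Int))
  let lt0 := PySem.List.pyGetD logtype 0 ""
  let lt1 := PySem.List.pyGetD logtype 1 ""
  ([("40", (0 : Int)), ("40", 1), ("60", 0), ("60", 1), ("80", 0), ("80", 1),
    ("100", 0), ("100", 1), ("120", 0), ("120", 1), ("140", 0), ("140", 1)] : List (String × Int)).map
    (fun p => directory.filter (fun f => dgTag la lt0 lt1 i1 i2 i3 i4 f == some (p.2, p.1)))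

-- ===== PRECONDITION & SPEC =====
-- Pre_ is exactly where Python A returns: index_traf[0..3] always read (4 entries needed); logtype[0] is read
-- for every file, and logtype[1] for every file whose first branch condition fails.
def Pre_datagatherlookahead (_lookahead : Int) (directory : List String) (logtype : List String) (index_traf : List (Int × Int)) : Prop :=
  4 ≤ index_traf.length ∧
  (directory = [] ∨ 2 ≤ logtype.length ∨
    (1 ≤ logtype.length ∧ ∀ f ∈ directory,
      PySem.Str.isIn (PySem.List.pyGetD logtype 0 "") f = true ∧ PySem.Str.isIn "WASLOSLOG" f = false))
instance (lookahead : Int) (directory : List String) (logtype : List String) (index_traf : List (Int × Int)) : Decidable (Pre_datagatherlookahead lookahead directory logtype index_traf) := by unfold Pre_datagatherlookahead; infer_instance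

def pvWitness_datagatherlookahead : Int × List String × List String × (List (Int × Int)) :=
  (5, ["CONFLOG_100_5_x", "CONFLOG_40_5_xx"], ["CONFLOG", "TRAJLOG"], [(8, 11), (8, 10), (8, 11), (8, 10)])

def Spec_datagatherlookahead (lookahead : Int) (directory : List String) (logtype : List String) (index_traf : List (Int × Int)) (out : List (List String)) : Prop := out = datagatherlookahead_alt lookahead directory logtype index_traf
instance (lookahead : Int) (directory : List String) (logtype : List String) (index_traf : List (Int × Int)) (out : List (List String)) : Decidable (Spec_datagatherlookahead lookahead directory logtype index_traf out) := by unfold Spec_datagatherlookahead; infer_instance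

-- ===== CLAIM (what is proved, stated in full; the proofs are below) =====
def Claim_equal_datagatherlookahead : Prop := ∀ (lookahead : Int) (directory : List String) (logtype : List String) (index_traf : List (Int × Int)), Dom_datagatherlookahead lookahead directory logtype index_traf → Pre_datagatherlookahead lookahead directory logtype index_traf → Spec_datagatherlookahead lookahead directory logtype index_traf (datagatherlookahead lookahead directory logtype index_traf)

-- ===== LEMMAS AND PROOFS =====

-- conditional update of the twelve buckets by a tag value
def dgApply (b : Buckets) (f : String) (t : Option (Int × String)) : Buckets :=
  { s40 := if t == some (0, "40") then b.s40 ++ [f] else b.s40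
    t40 := if t == some (1, "40") then b.t40 ++ [f] else b.t40
    s60 := if t == some (0, "60") then b.s60 ++ [f] else b.s60
    t60 := if t == some (1, "60") then b.t60 ++ [f] else b.t60
    s80 := if t == some (0, "80") then b.s80 ++ [f] else b.s80
    t80 := if t == some (1, "80") then b.t80 ++ [f] else b.t80
    s100 := if t == some (0, "100") then b.s100 ++ [f] else b.s100
    t100 := if t == some (1, "100") then b.t100 ++ [f] else b.t100
    s120 := if t == some (0, "120") then b.s120 ++ [f] else b.s120
    t120 := if t == some (1, "120") then b.t120 ++ [f] else b.t120
    s140 := if t == some (0, "140") then b.s140 ++ [f] else b.s140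
    t140 := if t == some (1, "140") then b.t140 ++ [f] else b.t140 }

-- B's grouped classifier rewritten as A's six-way elif chain
lemma dgClassify_chain (la : String) (c : Int) (h l : Int × Int) (f : String) :
    dgClassify la c h l f =
      if PySem.Str.slice f (some h.1) (some h.2) == "100" && PySem.Str.slice f (some (h.1+4)) (some (h.2+3)) == la then some (c, "100")
      else if PySem.Str.slice f (some h.1) (some h.2) == "120" && PySem.Str.slice f (some (h.1+4)) (some (h.2+3)) == la then some (c, "120")
      else if PySem.Str.slice f (some h.1) (some h.2) == "140" && PySem.Str.slice f (some (h.1+4)) (some (h.2+3)) == la then some (c, "140")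
      else if PySem.Str.slice f (some l.1) (some l.2) == "80" && PySem.Str.slice f (some (l.1+3)) (some (l.2+3)) == la then some (c, "80")
      else if PySem.Str.slice f (some l.1) (some l.2) == "60" && PySem.Str.slice f (some (l.1+3)) (some (l.2+3)) == la then some (c, "60")
      else if PySem.Str.slice f (some l.1) (some l.2) == "40" && PySem.Str.slice f (some (l.1+3)) (some (l.2+3)) == la then some (c, "40")
      else none := by
  unfold dgClassify
  by_cases m3 : PySem.Str.slice f (some (h.1+4)) (some (h.2+3)) = la <;>
    by_cases m2 : PySem.Str.slice f (some (l.1+3)) (some (l.2+3)) = la <;>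
      by_cases e1 : PySem.Str.slice f (some h.1) (some h.2) = "100" <;>
        by_cases e2 : PySem.Str.slice f (some h.1) (some h.2) = "120" <;>
          by_cases e3 : PySem.Str.slice f (some h.1) (some h.2) = "140" <;>
            by_cases d1 : PySem.Str.slice f (some l.1) (some l.2) = "80" <;>
              by_cases d2 : PySem.Str.slice f (some l.1) (some l.2) = "60" <;>
                by_cases d3 : PySem.Str.slice f (some l.1) (some l.2) = "40" <;>
                  simp_all

-- one loop step of A is the conditional bucket update by B's tag
lemma dgStepA_eq_apply (la lt0 lt1 : String) (i1 i2 i3 i4 : Int × Int) (b : Buckets) (f : String) :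
    dgStepA la lt0 lt1 i1 i2 i3 i4 b f = dgApply b f (dgTag la lt0 lt1 i1 i2 i3 i4 f) := by
  unfold dgStepA dgTag
  by_cases hW : PySem.Str.isIn "WASLOSLOG" f = true <;>
    by_cases h0 : PySem.Str.isIn lt0 f = true <;>
      by_cases h1 : PySem.Str.isIn lt1 f = true <;>
        simp only [hW, h0, h1, Bool.not_true, Bool.not_false, Bool.and_true, Bool.and_false,
          if_true, if_false, Bool.false_eq_true, dgClassify_chain] <;>
        first
          | (split_ifs <;> simp_all [dgApply])
          | simp_all [dgApply]

lemma condAppend (x F : List String) (c : Bool) (f : String) :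
    (if c then x ++ [f] else x) ++ F = x ++ (if c then f :: F else F) := by
  split_ifs <;> simp

-- loop invariant: A's fold extends every bucket by the files B's tag sends there, in order
lemma foldl_dgStepA (la lt0 lt1 : String) (i1 i2 i3 i4 : Int × Int) (dir : List String) :
    ∀ b : Buckets, dir.foldl (dgStepA la lt0 lt1 i1 i2 i3 i4) b =
      { s40 := b.s40 ++ dir.filter (fun f => dgTag la lt0 lt1 i1 i2 i3 i4 f == some (0, "40"))
        t40 := b.t40 ++ dir.filter (fun f => dgTag la lt0 lt1 i1 i2 i3 i4 f == some (1, "40"))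
        s60 := b.s60 ++ dir.filter (fun f => dgTag la lt0 lt1 i1 i2 i3 i4 f == some (0, "60"))
        t60 := b.t60 ++ dir.filter (fun f => dgTag la lt0 lt1 i1 i2 i3 i4 f == some (1, "60"))
        s80 := b.s80 ++ dir.filter (fun f => dgTag la lt0 lt1 i1 i2 i3 i4 f == some (0, "80"))
        t80 := b.t80 ++ dir.filter (fun f => dgTag la lt0 lt1 i1 i2 i3 i4 f == some (1, "80"))
        s100 := b.s100 ++ dir.filter (fun f => dgTag la lt0 lt1 i1 i2 i3 i4 f == some (0, "100"))
        t100 := b.t100 ++ dir.filter (fun f => dgTag la lt0 lt1 i1 i2 i3 i4 f == some (1, "100"))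
        s120 := b.s120 ++ dir.filter (fun f => dgTag la lt0 lt1 i1 i2 i3 i4 f == some (0, "120"))
        t120 := b.t120 ++ dir.filter (fun f => dgTag la lt0 lt1 i1 i2 i3 i4 f == some (1, "120"))
        s140 := b.s140 ++ dir.filter (fun f => dgTag la lt0 lt1 i1 i2 i3 i4 f == some (0, "140"))
        t140 := b.t140 ++ dir.filter (fun f => dgTag la lt0 lt1 i1 i2 i3 i4 f == some (1, "140")) } := by
  induction dir with
  | nil => intro b; simp
  | cons f dir ih =>
    intro b
    simp only [List.foldl_cons, dgStepA_eq_apply, ih, dgApply, List.filter_cons, condAppend]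

-- ===== VERDICT (by name: the statement is the Claim_ definition above) =====
theorem datagatherlookahead_spec : Claim_equal_datagatherlookahead := by
  intro lookahead directory logtype index_traf _ _
  unfold Spec_datagatherlookahead datagatherlookahead datagatherlookahead_alt
  simp only [foldl_dgStepA, List.map_cons, List.map_nil, List.nil_append]
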